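-- pv_equiv track=rewrite | github.com/RFogarty1/plato_gen_basis_helpers | gen_basis_helpers/castep/castep_creator.py | getCastepIndicesFromEleList
-- ===== SOURCE A (Python) =====
-- def getCastepIndicesFromEleList(eleList):
-- 	""" Get atomic indices as used by castep
--
-- 	Args:
-- 		eleList (iter of Str): Each entry is one element symbol
--
-- 	Returns
-- 		 idxList (iter of ints): The element indices castep-style. This means the indices start at one and refer to indices within an atomic speciies. E.g. ["X","Y","X"] would lead to [1,1,2] returned
--
-- 	"""
-- 	idxList = list()
-- 	elesFound = list()
-- 	numbInstances = list()
-- 	for ele in eleList: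
-- 		if ele in elesFound:
-- 			currEleIdx = elesFound.index(ele)
-- 			numbInstances[currEleIdx] += 1
-- 			currIdx = numbInstances[currEleIdx]
-- 		else:
-- 			elesFound.append(ele)
-- 			numbInstances.append(1)
-- 			currIdx = 1
--
-- 		idxList.append(currIdx)
--
-- 	return idxList
-- ===== SOURCE B (Python) =====
-- def getCastepIndicesFromEleList(eleList):
-- 	seq = list(eleList)
-- 	return [seq[:i+1].count(e) for i, e in enumerate(seq)]
-- ===== Notes on version B (the rewrite author's own statement) =====
-- stated objective: simpler
-- what changed: Replaced the running element/count table maintenance loop by a single comprehension that recomputes each running index as the count of the element in the prefix up to and including it.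
import Mathlib
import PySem

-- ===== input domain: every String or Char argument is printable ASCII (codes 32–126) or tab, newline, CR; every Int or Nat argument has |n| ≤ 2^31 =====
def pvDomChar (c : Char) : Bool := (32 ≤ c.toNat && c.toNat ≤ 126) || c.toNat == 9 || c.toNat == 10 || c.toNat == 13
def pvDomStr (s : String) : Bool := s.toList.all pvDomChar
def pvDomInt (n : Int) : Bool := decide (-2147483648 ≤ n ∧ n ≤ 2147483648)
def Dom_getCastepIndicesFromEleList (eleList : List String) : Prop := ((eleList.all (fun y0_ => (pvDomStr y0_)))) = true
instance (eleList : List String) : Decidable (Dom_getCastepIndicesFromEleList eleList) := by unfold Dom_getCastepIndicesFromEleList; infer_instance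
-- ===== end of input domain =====

-- B replaces A's running element/count tables by a prefix-count comprehension (simpler; same results).


-- ===== PORT A =====
-- Loop of A as structural recursion over the remaining elements, carrying the
-- same three lists (idxList, elesFound, numbInstances) as state.
def getCastepGo (eles : List String) (idxList : List Int)
    (elesFound : List String) (numbInstances : List Int) : List Int :=
  match eles with
  | [] => idxList
  | ele :: rest =>
    if ele ∈ elesFound then
      -- elesFound.index(ele): in range because ele ∈ elesFound, so getD never defaults
      let currEleIdx := (PySem.List.index? elesFound ele).getD 0
      let numbInstances' := numbInstances.set currEleIdx (numbInstances.getD currEleIdx 0 + 1)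
      let currIdx := numbInstances'.getD currEleIdx 0
      getCastepGo rest (idxList ++ [currIdx]) elesFound numbInstances'
    else
      getCastepGo rest (idxList ++ [1]) (elesFound ++ [ele]) (numbInstances ++ [1])

def getCastepIndicesFromEleList (eleList : List String) : List Int :=
  getCastepGo eleList [] [] []

-- ===== PORT B =====
-- Source B: [seq[:i+1].count(e) for i, e in enumerate(seq)]; i ≥ 0 so seq[:i+1] = take (i+1)
def getCastepIndicesFromEleList_alt (eleList : List String) : List Int :=
  (PySem.List.enumerate eleList).map
    (fun p => (PySem.List.count (eleList.take (p.1.toNat + 1)) p.2 : Int))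

-- ===== PRECONDITION & SPEC =====
def Spec_getCastepIndicesFromEleList (eleList : List String) (out : List Int) : Prop := out = getCastepIndicesFromEleList_alt eleList
instance (eleList : List String) (out : List Int) : Decidable (Spec_getCastepIndicesFromEleList eleList out) := by unfold Spec_getCastepIndicesFromEleList; infer_instance

-- ===== CLAIM (what is proved, stated in full; the proofs are below) =====
def Claim_equal_getCastepIndicesFromEleList : Prop := ∀ (eleList : List String), Dom_getCastepIndicesFromEleList eleList → Spec_getCastepIndicesFromEleList eleList (getCastepIndicesFromEleList eleList)

-- ===== LEMMAS AND PROOFS =====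

-- Reference function: running index of each element relative to an already-seen prefix.
def castepSpecTail (pref : List String) : List String → List Int
  | [] => []
  | e :: rest => ((pref.count e : Int) + 1) :: castepSpecTail (pref ++ [e]) rest

-- Invariant tying A's tables to the processed prefix.
def castepInv (pref : List String) (elesFound : List String) (numbInstances : List Int) : Prop :=
  (∀ e, e ∈ elesFound ↔ e ∈ pref) ∧
  numbInstances.length = elesFound.length ∧
  (∀ e k, PySem.List.index? elesFound e = some k → numbInstances.getD k 0 = pref.count e)

theorem castepGetD_set_self (l : List Int) (k : Nat) (v : Int) (h : k < l.length) :
    (l.set k v).getD k 0 = v := by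
  rw [List.getD_eq_getElem?_getD, List.getElem?_set_self (by omega)]
  rfl

theorem castepGetD_set_ne (l : List Int) (j k : Nat) (v : Int) (h : j ≠ k) :
    (l.set k v).getD j 0 = l.getD j 0 := by
  rw [List.getD_eq_getElem?_getD, List.getElem?_set_ne (by omega), ← List.getD_eq_getElem?_getD]

theorem castepGo_spec :
    ∀ (eles pref : List String) (idxList : List Int)
      (elesFound : List String) (numbInstances : List Int),
      castepInv pref elesFound numbInstances →
      getCastepGo eles idxList elesFound numbInstances = idxList ++ castepSpecTail pref eles := by
  intro eles
  induction eles with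
  | nil => intro pref idxList ef ni _; simp [getCastepGo, castepSpecTail]
  | cons e rest ih =>
    intro pref idxList ef ni hInv
    obtain ⟨hmem, hlen, hcnt⟩ := hInv
    by_cases h : e ∈ ef
    · -- found branch
      obtain ⟨k, hk⟩ := Option.isSome_iff_exists.mp
        ((PySem.List.index?_isSome_iff ef e).2 h)
      have hklt : k < ef.length := (PySem.List.getElem_of_index?_eq_some hk).1
      have hgd : ni.getD k 0 = pref.count e := hcnt e k hk
      have hklt' : k < ni.length := hlen ▸ hklt
      simp only [getCastepGo, if_pos h, hk, Option.getD_some]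
      rw [castepGetD_set_self _ _ _ hklt']
      have hinv' : castepInv (pref ++ [e]) ef (ni.set k (ni.getD k 0 + 1)) := by
        refine ⟨?_, by simp [hlen], ?_⟩
        · intro x
          rw [hmem x]
          constructor
          · intro hx
            exact List.mem_append_left _ hx
          · intro hx
            rcases List.mem_append.mp hx with hx | hx
            · exact hx
            · simp only [List.mem_singleton] at hx
              rw [hx]
              exact (hmem e).mp h
        · intro x j hj
          by_cases hxe : x = e
          · have hjk : j = k := by rw [hxe, hk] at hj; exact (Option.some.injEq _ _).mp hj.symm ▸ rfl
            rw [hjk, castepGetD_set_self _ _ _ hklt', hgd, hxe]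
            simp [List.count_append]
          · have hjk : j ≠ k := by
              intro hEq
              rw [hEq] at hj
              obtain ⟨h1, he1, _⟩ := PySem.List.getElem_of_index?_eq_some hk
              obtain ⟨h2, hx1, _⟩ := PySem.List.getElem_of_index?_eq_some hj
              exact hxe (hx1.symm.trans he1)
            rw [castepGetD_set_ne _ _ _ _ hjk, hcnt x j hj]
            have hne : e ≠ x := fun hc => hxe hc.symm
            simp [List.count_append, hne]
      rw [ih (pref ++ [e]) _ ef _ hinv', hgd]
      simp [castepSpecTail]
    · -- new element branch
      simp only [getCastepGo, if_neg h]
      have hcnt0 : pref.count e = 0 := by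
        rw [List.count_eq_zero]
        intro hmem'
        exact h ((hmem e).mpr hmem')
      have hinv' : castepInv (pref ++ [e]) (ef ++ [e]) (ni ++ [1]) := by
        refine ⟨?_, by simp [hlen], ?_⟩
        · intro x
          simp only [List.mem_append, List.mem_singleton, hmem x]
        · intro x j hj
          by_cases hxe : x = e
          · rw [hxe] at hj ⊢
            rw [PySem.List.index?_append_singleton_self ef e h] at hj
            have hje : j = ef.length := (Option.some.injEq _ _).mp hj.symm ▸ rfl
            rw [hje, List.getD_eq_getElem?_getD, List.getElem?_append_right (by omega)]
            simp [hlen, hcnt0, List.count_append]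
          · have hxef : PySem.List.index? ef x = some j := by
              by_cases hx : x ∈ ef
              · rw [PySem.List.index?_append_of_mem _ hx] at hj; exact hj
              · exfalso
                have hnx : x ∉ ef ++ [e] := by
                  intro hc
                  rcases List.mem_append.mp hc with hc | hc
                  · exact hx hc
                  · simp only [List.mem_singleton] at hc; exact hxe hc
                rw [(PySem.List.index?_eq_none_iff _ _).mpr hnx] at hj
                simp at hj
            have hjlt : j < ef.length := (PySem.List.getElem_of_index?_eq_some hxef).1
            rw [List.getD_eq_getElem?_getD, List.getElem?_append_left (by omega)]
            rw [← List.getD_eq_getElem?_getD, hcnt x j hxef]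
            have hne : e ≠ x := fun hc => hxe hc.symm
            simp [List.count_append, hne]
      rw [ih (pref ++ [e]) _ _ _ hinv']
      simp [castepSpecTail, hcnt0]

-- B equals the reference function (indices shifted by the prefix length).
theorem castepAlt_spec :
    ∀ (rest pref : List String),
      (PySem.List.enumerate rest (pref.length : Int)).map
        (fun p => (PySem.List.count ((pref ++ rest).take (p.1.toNat + 1)) p.2 : Int))
        = castepSpecTail pref rest := by
  intro rest
  induction rest with
  | nil => intro pref; simp [PySem.List.enumerate_nil, castepSpecTail]
  | cons e rs ih =>
    intro pref
    rw [PySem.List.enumerate_cons]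
    simp only [List.map_cons, castepSpecTail, List.cons.injEq]
    refine ⟨?_, ?_⟩
    · have ht : (pref.length : Int).toNat = pref.length := by simp
      rw [ht]
      have htake : (pref ++ e :: rs).take (pref.length + 1) = pref ++ [e] := by
        simp [List.take_append]
      rw [htake, PySem.List.count_eq]
      simp [List.count_append]
    · have h1 : (pref.length : Int) + 1 = ((pref ++ [e]).length : Int) := by simp
      have h2 : pref ++ e :: rs = (pref ++ [e]) ++ rs := by simp
      rw [h1, h2]
      exact ih (pref ++ [e])

-- ===== VERDICT (by name: the statement is the Claim_ definition above) =====
theorem getCastepIndicesFromEleList_spec : Claim_equal_getCastepIndicesFromEleList := by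
  intro eleList _
  unfold Spec_getCastepIndicesFromEleList getCastepIndicesFromEleList getCastepIndicesFromEleList_alt
  rw [castepGo_spec eleList [] [] [] []
    ⟨by simp, rfl, by
      intro e k hkk
      rw [(PySem.List.index?_eq_none_iff _ _).mpr (by simp)] at hkk
      simp at hkk⟩]
  have hB := castepAlt_spec eleList []
  simp only [List.nil_append] at hB ⊢
  exact hB.symm
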